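-- pv_equiv track=rewrite | github.com/sullenb/agari | agari_validator/agari_validator.py | mjai_tiles_to_agari
-- ===== SOURCE A (Python) =====
-- from collections import defaultdict
--
-- MJAI_TO_AGARI_HONOR = {
--     "E": "1z",  # East
--     "S": "2z",  # South
--     "W": "3z",  # West
--     "N": "4z",  # North
--     "P": "5z",  # White dragon (Haku/白)
--     "F": "6z",  # Green dragon (Hatsu/發)
--     "C": "7z",  # Red dragon (Chun/中)
-- }
--
-- def mjai_tile_to_agari(tile: str) -> str:
--     """Convert a single mjai tile to agari notation."""
--     if tile in MJAI_TO_AGARI_HONOR: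
--         return MJAI_TO_AGARI_HONOR[tile]
--
--     # Handle red fives (5mr, 5pr, 5sr -> 0m, 0p, 0s)
--     if tile.endswith("r"):
--         suit = tile[-2]  # m, p, or s
--         return f"0{suit}"
--
--     # Regular numbered tiles (1m, 2p, 3s, etc.) pass through
--     return tile
--
-- def mjai_tiles_to_agari(tiles: list[str]) -> str:
--     """
--     Convert a list of mjai tiles to agari hand notation.
--     Groups tiles by suit for compact notation.
--     """
--     suits = defaultdict(list)
--
--     for tile in tiles:
--         agari_tile = mjai_tile_to_agari(tile)
--         if agari_tile.endswith("z"):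
--             suits["z"].append(agari_tile[0])
--         else:
--             suit = agari_tile[-1]
--             num = agari_tile[:-1]
--             suits[suit].append(num)
--
--     # Build the hand string, sorting within each suit
--     result = []
--     for suit in ["m", "p", "s", "z"]:
--         if suits[suit]:
--             nums = "".join(sorted(suits[suit], key=lambda x: (x == "0", x)))
--             result.append(f"{nums}{suit}")
--
--     return "".join(result)
-- ===== SOURCE B (Python) =====
-- MJAI_TO_AGARI_HONOR = {
--     "E": "1z",
--     "S": "2z",
--     "W": "3z",
--     "N": "4z",
--     "P": "5z",
--     "F": "6z",
--     "C": "7z",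
-- }
--
-- SUIT_RANK = {"m": 0, "p": 1, "s": 2, "z": 3}
-- SUIT_LETTER = "mpsz"
--
-- def mjai_tiles_to_agari(tiles: list[str]) -> str:
--     """Decorate-sort-group: key every tile once as (suit rank, red-five flag, num),
--     sort the whole hand in ONE global sort, then emit in a single linear scan,
--     closing each suit group with its letter when the rank changes."""
--     keyed = []
--     for tile in tiles:
--         t = MJAI_TO_AGARI_HONOR.get(tile, tile)
--         if t.endswith("z"):
--             suit, num = "z", t[0]
--         elif t.endswith("r"):
--             suit, num = t[-2], "0"
--         else:
--             suit, num = t[-1], t[:-1]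
--         rank = SUIT_RANK.get(suit, -1)
--         if rank >= 0:
--             keyed.append((rank, num == "0", num))
--     keyed.sort()
--     out = []
--     prev = -1
--     for rank, _, num in keyed:
--         if prev >= 0 and rank != prev:
--             out.append(SUIT_LETTER[prev])
--         out.append(num)
--         prev = rank
--     if prev >= 0:
--         out.append(SUIT_LETTER[prev])
--     return "".join(out)
-- ===== Notes on version B (the rewrite author's own statement) =====
-- stated objective: alternative
-- what changed: A buckets tiles into per-suit lists in a defaultdict and runs a separate comparison sort inside each suit before joining; B decorates every tile once with a (suit-rank, red-five flag, num) key, performs ONE global sort of the whole hand, and produces the string in a single linear scan that closes a suit group with its letter whenever the rank changes (no buckets, no per-suit passes).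
import Mathlib
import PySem

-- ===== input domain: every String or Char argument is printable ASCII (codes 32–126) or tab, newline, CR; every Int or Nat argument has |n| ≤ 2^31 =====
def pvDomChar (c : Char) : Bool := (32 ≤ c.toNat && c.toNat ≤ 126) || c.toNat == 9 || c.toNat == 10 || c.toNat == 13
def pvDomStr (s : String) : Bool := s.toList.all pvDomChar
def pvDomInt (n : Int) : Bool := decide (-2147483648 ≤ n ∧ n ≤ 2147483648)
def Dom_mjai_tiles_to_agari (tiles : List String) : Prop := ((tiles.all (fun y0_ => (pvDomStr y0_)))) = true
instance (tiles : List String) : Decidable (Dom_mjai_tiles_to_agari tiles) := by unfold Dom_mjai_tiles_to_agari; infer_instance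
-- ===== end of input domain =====

-- B replaces A's per-suit defaultdict buckets and per-suit sorts by ONE global sort of
-- (suit-rank, red-five flag, num) keys followed by a single linear scan that closes each
-- suit group with its letter (objective: alternative; same return value).

-- ===== PORT A =====
-- MJAI_TO_AGARI_HONOR (module constant, shared by both implementations)
def pvHonorPairs : List (List Char × List Char) :=
  [(['E'], ['1','z']), (['S'], ['2','z']), (['W'], ['3','z']), (['N'], ['4','z']),
   (['P'], ['5','z']), (['F'], ['6','z']), (['C'], ['7','z'])]

-- helper mjai_tile_to_agari
def mjai_tile_to_agari (tile : List Char) : List Char :=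
  match (PySem.Dict.ofList pvHonorPairs).get? tile with
  | some v => v
  | none =>
    if PySem.Chars.endswith tile ['r'] then
      match PySem.Chars.pyGet? tile (-2) with
      | some suit => ['0', suit]
      | none => []          -- IndexError on tile = "r": excluded by Pre_
    else tile

def mjai_tiles_to_agari (tiles : List String) : String :=
  let suits := tiles.foldl (fun (d : PySem.Dict Char (List (List Char))) tile =>
      let agari := mjai_tile_to_agari tile.toList
      if PySem.Chars.endswith agari ['z'] then
        match PySem.Chars.pyGet? agari 0 with
        | some c => d.modify 'z' [] (fun l => l ++ [[c]])
        | none => d         -- unreachable: a string ending in 'z' is nonempty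
      else
        match PySem.Chars.pyGet? agari (-1) with
        | some suit => d.modify suit [] (fun l => l ++ [PySem.Chars.slice agari none (some (-1))])
        | none => d         -- IndexError on tile = "": excluded by Pre_
    ) PySem.Dict.empty
  let result := ['m','p','s','z'].foldl (fun (res : List (List Char)) suit =>
      if suits.getD suit [] ≠ [] then
        res ++ [PySem.Chars.join []
            (PySem.List.sorted2 (suits.getD suit []) (fun x => x == ['0']) (fun x => x)) ++ [suit]]
      else res) []
  String.ofList (PySem.Chars.join [] result)

-- ===== PORT B =====
-- helper: B's if/elif/else chain computing (suit, num) for one honor-resolved tile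
def pvTileKey (t : List Char) : Char × List Char :=
  if PySem.Chars.endswith t ['z'] then
    match PySem.Chars.pyGet? t 0 with
    | some c => ('z', [c])
    | none => (' ', [])     -- unreachable: a string ending in 'z' is nonempty
  else if PySem.Chars.endswith t ['r'] then
    match PySem.Chars.pyGet? t (-2) with
    | some suit => (suit, ['0'])
    | none => (' ', [])     -- IndexError on t = "r": excluded by Pre_
  else
    match PySem.Chars.pyGet? t (-1) with
    | some suit => (suit, PySem.Chars.slice t none (some (-1)))
    | none => (' ', [])     -- IndexError on t = "": excluded by Pre_

-- SUIT_RANK and SUIT_LETTER (module constants of B)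
def pvSuitRank : PySem.Dict Char Int :=
  PySem.Dict.ofList [('m', 0), ('p', 1), ('s', 2), ('z', 3)]
def pvSuitLetter : List Char := ['m', 'p', 's', 'z']

def mjai_tiles_to_agari_alt (tiles : List String) : String :=
  let keyed := tiles.foldl (fun (ks : List (Int × Bool × List Char)) tile =>
      let sn := pvTileKey ((PySem.Dict.ofList pvHonorPairs).getD tile.toList tile.toList)
      let rank := pvSuitRank.getD sn.1 (-1)
      if rank ≥ 0 then ks ++ [(rank, sn.2 == ['0'], sn.2)] else ks) []
  -- keyed.sort(): Python's tuple order = lexicographic (rank, flag, num)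
  let sortedKeyed := PySem.List.sorted keyed (fun x => toLex (x.1, toLex (x.2.1, x.2.2)))
  let st := sortedKeyed.foldl (fun (st : List (List Char) × Int) x =>
      let out := if st.2 ≥ 0 ∧ x.1 ≠ st.2 then
          st.1 ++ [match PySem.Chars.pyGet? pvSuitLetter st.2 with | some c => [c] | none => []]
        else st.1
      (out ++ [x.2.2], x.1)) ([], -1)
  let out := if st.2 ≥ 0 then
      st.1 ++ [match PySem.Chars.pyGet? pvSuitLetter st.2 with | some c => [c] | none => []]
    else st.1
  String.ofList (PySem.Chars.join [] out)

-- ===== PRECONDITION & SPEC =====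
-- Pre_ excludes exactly the tiles on which A raises IndexError: the empty string and "r"
-- (both make A index past the end of the string); B raises there too.
def Pre_mjai_tiles_to_agari (tiles : List String) : Prop :=
  ∀ t ∈ tiles, t.toList ≠ [] ∧ t.toList ≠ ['r']
instance (tiles : List String) : Decidable (Pre_mjai_tiles_to_agari tiles) := by
  unfold Pre_mjai_tiles_to_agari; infer_instance

def pvWitness_mjai_tiles_to_agari : List String := ["5mr", "E", "1m", "2p", "2p"]

def Spec_mjai_tiles_to_agari (tiles : List String) (out : String) : Prop := out = mjai_tiles_to_agari_alt tiles
instance (tiles : List String) (out : String) : Decidable (Spec_mjai_tiles_to_agari tiles out) := by unfold Spec_mjai_tiles_to_agari; infer_instance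

-- ===== CLAIM (what is proved, stated in full; the proofs are below) =====
def Claim_equal_mjai_tiles_to_agari : Prop := ∀ (tiles : List String), Dom_mjai_tiles_to_agari tiles → Pre_mjai_tiles_to_agari tiles → Spec_mjai_tiles_to_agari tiles (mjai_tiles_to_agari tiles)

-- ===== LEMMAS AND PROOFS =====

-- the honor-resolved (suit, num) pair of one tile (proof-side abbreviation)
def pvResolve (t : String) : Char × List Char :=
  pvTileKey ((PySem.Dict.ofList pvHonorPairs).getD t.toList t.toList)

def pvRank (c : Char) : Int := pvSuitRank.getD c (-1)

-- B's decoration of one (suit, num) pair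
def pvG (p : Char × List Char) : Int × Bool × List Char := (pvRank p.1, p.2 == ['0'], p.2)

-- the global sort key and A's per-suit sort key
def pvKeyG (x : Int × Bool × List Char) : Lex (Int × Lex (Bool × List Char)) :=
  toLex (x.1, toLex (x.2.1, x.2.2))
def pvKey (x : List Char) : Lex (Bool × List Char) := toLex (x == ['0'], x)

-- A's bucket for suit c, as a filter over the resolved pairs
def pvASuit (P : List (Char × List Char)) (c : Char) : List (List Char) :=
  (P.filter (fun p => p.1 == c)).map (fun p => p.2)

-- B's sorted chunk for suit c
def pvChunk (P : List (Char × List Char)) (c : Char) : List (Int × Bool × List Char) :=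
  (PySem.List.sorted2 (pvASuit P c) (fun x => x == ['0']) (fun x => x)).map
    (fun n => (pvRank c, n == ['0'], n))

-- B's emission pieces (proof-side names for the port's inline code)
def pvLetterOf (r : Int) : List Char :=
  match PySem.Chars.pyGet? pvSuitLetter r with | some c => [c] | none => []
def pvStep (st : List (List Char) × Int) (x : Int × Bool × List Char) :
    List (List Char) × Int :=
  let out := if st.2 ≥ 0 ∧ x.1 ≠ st.2 then st.1 ++ [pvLetterOf st.2] else st.1
  (out ++ [x.2.2], x.1)
def pvClose (st : List (List Char) × Int) : List (List Char) :=
  if st.2 ≥ 0 then st.1 ++ [pvLetterOf st.2] else st.1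

lemma pv_rank_nonneg_iff (c : Char) : 0 ≤ pvRank c ↔ c = 'm' ∨ c = 'p' ∨ c = 's' ∨ c = 'z' := by
  unfold pvRank pvSuitRank
  have hit : (PySem.Dict.ofList [('m', (0:Int)), ('p', 1), ('s', 2), ('z', 3)]).items
      = [('m', 0), ('p', 1), ('s', 2), ('z', 3)] := by decide
  simp [PySem.Dict.getD, PySem.Dict.get?, hit, List.find?]
  by_cases h1 : c = 'm'
  · simp [h1]
  · by_cases h2 : c = 'p'
    · simp [h2]
    · by_cases h3 : c = 's'
      · simp [h3]
      · by_cases h4 : c = 'z'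
        · simp [h4]
        · have e1 : ('m' == c) = false := beq_eq_false_iff_ne.mpr (Ne.symm h1)
          have e2 : ('p' == c) = false := beq_eq_false_iff_ne.mpr (Ne.symm h2)
          have e3 : ('s' == c) = false := beq_eq_false_iff_ne.mpr (Ne.symm h3)
          have e4 : ('z' == c) = false := beq_eq_false_iff_ne.mpr (Ne.symm h4)
          simp [e1,e2,e3,e4,h1,h2,h3,h4]

lemma pv_keyed_eq (tiles : List String) :
    tiles.foldl (fun (ks : List (Int × Bool × List Char)) tile =>
      let sn := pvTileKey ((PySem.Dict.ofList pvHonorPairs).getD tile.toList tile.toList)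
      let rank := pvSuitRank.getD sn.1 (-1)
      if rank ≥ 0 then ks ++ [(rank, sn.2 == ['0'], sn.2)] else ks) []
    = ((tiles.map pvResolve).filter (fun p => decide (0 ≤ pvRank p.1))).map pvG := by
  show tiles.foldl (fun ks tile =>
      if 0 ≤ pvRank (pvResolve tile).1 then ks ++ [pvG (pvResolve tile)] else ks) []
    = ((tiles.map pvResolve).filter (fun p => decide (0 ≤ pvRank p.1))).map pvG
  rw [PySem.List.foldl_append_ite (fun t => (0:Int) ≤ pvRank (pvResolve t).1) (fun t => pvG (pvResolve t))]
  simp [List.filter_map, List.map_map, Function.comp_def]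

lemma pv_count_filter_neg {α : Type} [BEq α] [LawfulBEq α] (p : α → Bool) (l : List α) (a : α)
    (h : p a = false) : (l.filter p).count a = 0 :=
  List.count_eq_zero_of_not_mem (fun hm => by
    have h2 := (List.mem_filter.mp hm).2
    rw [h] at h2; exact Bool.false_ne_true h2)

lemma pv_partition_perm (P : List (Char × List Char)) :
    (P.filter (fun p => decide (0 ≤ pvRank p.1))).Perm
      (pvSuitLetter.flatMap (fun c => P.filter (fun p => p.1 == c))) := by
  rw [List.perm_iff_count]
  intro a
  simp only [pvSuitLetter, List.flatMap_cons, List.flatMap_nil, List.append_nil,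
    List.count_append]
  by_cases h : 0 ≤ pvRank a.1
  · have hpos : decide (0 ≤ pvRank a.1) = true := by simpa using h
    rw [List.count_filter (p := fun p => decide (0 ≤ pvRank p.1)) (l := P) hpos]
    rcases (pv_rank_nonneg_iff a.1).mp h with h1 | h1 | h1 | h1
    · rw [List.count_filter (p := fun p => p.1 == 'm') (l := P) (show (a.1 == 'm') = true by simp [h1]),
        pv_count_filter_neg (fun p => p.1 == 'p') P a (by simp [h1]),
        pv_count_filter_neg (fun p => p.1 == 's') P a (by simp [h1]),
        pv_count_filter_neg (fun p => p.1 == 'z') P a (by simp [h1])]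
      omega
    · rw [List.count_filter (p := fun p => p.1 == 'p') (l := P) (show (a.1 == 'p') = true by simp [h1]),
        pv_count_filter_neg (fun p => p.1 == 'm') P a (by simp [h1]),
        pv_count_filter_neg (fun p => p.1 == 's') P a (by simp [h1]),
        pv_count_filter_neg (fun p => p.1 == 'z') P a (by simp [h1])]
      omega
    · rw [List.count_filter (p := fun p => p.1 == 's') (l := P) (show (a.1 == 's') = true by simp [h1]),
        pv_count_filter_neg (fun p => p.1 == 'm') P a (by simp [h1]),
        pv_count_filter_neg (fun p => p.1 == 'p') P a (by simp [h1]),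
        pv_count_filter_neg (fun p => p.1 == 'z') P a (by simp [h1])]
      omega
    · rw [List.count_filter (p := fun p => p.1 == 'z') (l := P) (show (a.1 == 'z') = true by simp [h1]),
        pv_count_filter_neg (fun p => p.1 == 'm') P a (by simp [h1]),
        pv_count_filter_neg (fun p => p.1 == 'p') P a (by simp [h1]),
        pv_count_filter_neg (fun p => p.1 == 's') P a (by simp [h1])]
      omega
  · have := pv_rank_nonneg_iff a.1
    have h1 : a.1 ≠ 'm' := fun e => h (this.mpr (Or.inl e))
    have h2 : a.1 ≠ 'p' := fun e => h (this.mpr (Or.inr (Or.inl e)))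
    have h3 : a.1 ≠ 's' := fun e => h (this.mpr (Or.inr (Or.inr (Or.inl e))))
    have h4 : a.1 ≠ 'z' := fun e => h (this.mpr (Or.inr (Or.inr (Or.inr e))))
    rw [pv_count_filter_neg (fun p => decide (0 ≤ pvRank p.1)) P a (by simpa using h),
      pv_count_filter_neg (fun p => p.1 == 'm') P a (by simp [h1]),
      pv_count_filter_neg (fun p => p.1 == 'p') P a (by simp [h2]),
      pv_count_filter_neg (fun p => p.1 == 's') P a (by simp [h3]),
      pv_count_filter_neg (fun p => p.1 == 'z') P a (by simp [h4])]

lemma pvKeyG_injective : Function.Injective pvKeyG := by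
  intro a b h
  have h1 := congrArg (fun p => (ofLex p).1) h
  have h2 := congrArg (fun p => (ofLex (ofLex p).2).1) h
  have h3 := congrArg (fun p => (ofLex (ofLex p).2).2) h
  simp [pvKeyG] at h1 h2 h3
  exact Prod.ext h1 (Prod.ext h2 h3)

lemma pv_sorted2_key (xs : List (List Char)) :
    PySem.List.sorted2 xs (fun x => x == ['0']) (fun x => x) = PySem.List.sorted xs pvKey := by
  show List.foldl _ [] xs = List.foldl _ [] xs
  have hb : (fun (a b : List Char) =>
        decide ((a == ['0']) < (b == ['0'])) || (!decide ((b == ['0']) < (a == ['0'])) && decide (a < b)))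
      = (fun a b => decide (pvKey a < pvKey b)) := by
    funext a b
    cases hA : (a == ['0'] : Bool) <;> cases hB : (b == ['0'] : Bool) <;>
      simp [pvKey, hA, hB, Prod.Lex.toLex_lt_toLex, Bool.lt_iff]
  rw [hb]

lemma pv_chunk_pairwise (P : List (Char × List Char)) (c : Char) :
    (pvChunk P c).Pairwise (fun a b => pvKeyG a ≤ pvKeyG b) := by
  unfold pvChunk
  rw [pv_sorted2_key, List.pairwise_map]
  have h := PySem.List.sorted_pairwise (pvASuit P c) pvKey
  refine h.imp (fun {a b} hab => ?_)
  unfold pvKeyG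
  simp only
  rw [Prod.Lex.toLex_le_toLex]
  exact Or.inr ⟨rfl, hab⟩

lemma pv_chunk_first (P : List (Char × List Char)) (c : Char) :
    ∀ x ∈ pvChunk P c, x.1 = pvRank c := by
  intro x hx
  rcases List.mem_map.mp hx with ⟨n, _, rfl⟩
  rfl

lemma pv_cross (P : List (Char × List Char)) (c c' : Char) (h : pvRank c < pvRank c') :
    ∀ x ∈ pvChunk P c, ∀ y ∈ pvChunk P c', pvKeyG x ≤ pvKeyG y := by
  intro x hx y hy
  have h1 := pv_chunk_first P c x hx
  have h2 := pv_chunk_first P c' y hy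
  refine le_of_lt ?_
  unfold pvKeyG
  rw [Prod.Lex.toLex_lt_toLex]
  exact Or.inl (by rw [h1, h2]; exact h)

lemma pv_sorted_eq_chunks (P : List (Char × List Char)) :
    PySem.List.sorted ((P.filter (fun p => decide (0 ≤ pvRank p.1))).map pvG) pvKeyG
      = pvSuitLetter.flatMap (fun c => pvChunk P c) := by
  apply PySem.List.eq_of_perm_of_pairwise_le_of_injective pvKeyG pvKeyG_injective
  · -- permutation
    refine (PySem.List.sorted_perm _ _ _).trans ?_
    refine ((pv_partition_perm P).map pvG).trans ?_
    rw [List.map_flatMap]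
    have hsuit : ∀ c : Char, ((P.filter (fun p => p.1 == c)).map pvG).Perm (pvChunk P c) := by
      intro c
      have he : (P.filter (fun p => p.1 == c)).map pvG
          = (pvASuit P c).map (fun n => (pvRank c, n == ['0'], n)) := by
        unfold pvASuit
        rw [List.map_map]
        apply List.map_congr_left
        intro p hp
        have hc : p.1 = c := by simpa using (List.mem_filter.mp hp).2
        simp [pvG, Function.comp, hc]
      rw [he]
      unfold pvChunk
      rw [pv_sorted2_key]
      exact (List.Perm.map _ (PySem.List.sorted_perm _ _ _)).symm
    simp only [pvSuitLetter, List.flatMap_cons, List.flatMap_nil, List.append_nil]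
    exact (hsuit 'm').append ((hsuit 'p').append ((hsuit 's').append (hsuit 'z')))
  · exact PySem.List.sorted_pairwise _ _
  · -- pairwise of the concatenated chunks
    simp only [pvSuitLetter, List.flatMap_cons, List.flatMap_nil, List.append_nil]
    have d1 : pvRank 'm' < pvRank 'p' := by decide
    have d2 : pvRank 'm' < pvRank 's' := by decide
    have d3 : pvRank 'm' < pvRank 'z' := by decide
    have d4 : pvRank 'p' < pvRank 's' := by decide
    have d5 : pvRank 'p' < pvRank 'z' := by decide
    have d6 : pvRank 's' < pvRank 'z' := by decide
    refine List.pairwise_append.mpr ⟨pv_chunk_pairwise P 'm', ?_, ?_⟩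
    · refine List.pairwise_append.mpr ⟨pv_chunk_pairwise P 'p', ?_, ?_⟩
      · refine List.pairwise_append.mpr ⟨pv_chunk_pairwise P 's', pv_chunk_pairwise P 'z', ?_⟩
        exact pv_cross P 's' 'z' d6
      · intro x hx y hy
        rcases List.mem_append.mp hy with h | h
        · exact pv_cross P 'p' 's' d4 x hx y h
        · exact pv_cross P 'p' 'z' d5 x hx y h
    · intro x hx y hy
      rcases List.mem_append.mp hy with h | h
      · exact pv_cross P 'm' 'p' d1 x hx y h
      rcases List.mem_append.mp h with h | h
      · exact pv_cross P 'm' 's' d2 x hx y h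
      · exact pv_cross P 'm' 'z' d3 x hx y h

lemma pv_run_same (chunk : List (Int × Bool × List Char)) (r : Int)
    (h : ∀ x ∈ chunk, x.1 = r) : ∀ out : List (List Char),
    chunk.foldl pvStep (out, r) = (out ++ chunk.map (fun x => x.2.2), r) := by
  induction chunk with
  | nil => intro out; simp
  | cons x xs ih =>
    intro out
    have hx : x.1 = r := h x List.mem_cons_self
    simp only [List.foldl_cons, pvStep, hx]
    rw [if_neg (by simp)]
    rw [ih (fun y hy => h y (List.mem_cons_of_mem x hy)) (out ++ [x.2.2])]
    simp


lemma pv_run_chunk (chunk : List (Int × Bool × List Char)) (r : Int)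
    (out : List (List Char)) (prev : Int)
    (h : ∀ x ∈ chunk, x.1 = r) (hne : chunk ≠ []) (hpr : prev ≠ r) :
    chunk.foldl pvStep (out, prev)
      = ((if 0 ≤ prev then out ++ [pvLetterOf prev] else out) ++ chunk.map (fun x => x.2.2), r) := by
  cases chunk with
  | nil => exact absurd rfl hne
  | cons x xs =>
    have hx : x.1 = r := h x List.mem_cons_self
    simp only [List.foldl_cons, pvStep, hx]
    have hcond : (prev ≥ 0 ∧ r ≠ prev) ↔ 0 ≤ prev := by
      constructor
      · exact fun hh => hh.1
      · exact fun hh => ⟨hh, Ne.symm hpr⟩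
    by_cases h0 : 0 ≤ prev
    · rw [if_pos (hcond.mpr h0), if_pos h0,
        pv_run_same xs r (fun y hy => h y (List.mem_cons_of_mem x hy))]
      simp
    · rw [if_neg (fun hh => h0 (hcond.mp hh)), if_neg h0,
        pv_run_same xs r (fun y hy => h y (List.mem_cons_of_mem x hy))]
      simp


lemma pv_emit_gen (P : List (Char × List Char)) : ∀ (cs : List Char) (out : List (List Char)) (prev : Int),
    (∀ c ∈ cs, prev < pvRank c) → cs.Pairwise (fun a b => pvRank a < pvRank b) →
    (∀ c ∈ cs, 0 ≤ pvRank c) →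
    pvClose ((cs.flatMap (fun c => pvChunk P c)).foldl pvStep (out, prev))
      = pvClose (out, prev) ++ cs.flatMap (fun c =>
          if pvChunk P c = [] then []
          else (pvChunk P c).map (fun x => x.2.2) ++ [pvLetterOf (pvRank c)]) := by
  intro cs
  induction cs with
  | nil => intro out prev _ _ _; simp
  | cons c cs ih =>
    intro out prev hlt hpw hnn
    simp only [List.flatMap_cons, List.foldl_append]
    by_cases hc : pvChunk P c = []
    · rw [hc]
      simp only [List.foldl_nil]
      rw [ih out prev (fun c' h' => hlt c' (List.mem_cons_of_mem c h'))
        hpw.of_cons (fun c' h' => hnn c' (List.mem_cons_of_mem c h'))]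
      simp
    · have hprne : prev ≠ pvRank c := ne_of_lt (hlt c List.mem_cons_self)
      rw [pv_run_chunk (pvChunk P c) (pvRank c) out prev (pv_chunk_first P c) hc hprne]
      rw [ih _ (pvRank c) (fun c' h' => (List.pairwise_cons.mp hpw).1 c' h')
        hpw.of_cons (fun c' h' => hnn c' (List.mem_cons_of_mem c h'))]
      have h0 : (0:Int) ≤ pvRank c := hnn c List.mem_cons_self
      simp only [pvClose, if_pos h0, hc]
      by_cases hp0 : 0 ≤ prev <;> simp [hp0, List.append_assoc]


-- small Python-string facts used by the branch analyses
lemma pv_endswith_concat (l : List Char) (a c : Char) :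
    PySem.Chars.endswith (l ++ [a]) [c] = (a == c) := by
  rcases eq_or_ne a c with h | h
  · subst h
    have hs : [a] <:+ (l ++ [a]) := ⟨l, rfl⟩
    simp [PySem.Chars.endswith, List.isSuffixOf_iff_suffix, hs]
  · have hns : ¬ ([c] <:+ (l ++ [a])) := by
      rintro ⟨t, ht⟩
      have h2 := congrArg List.getLast? ht
      simp at h2
      exact h (h2.symm)
    have h1 : [c].isSuffixOf (l ++ [a]) = false := by
      rw [← Bool.not_eq_true]
      simpa [List.isSuffixOf_iff_suffix] using hns
    simp [PySem.Chars.endswith, h1, h]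

lemma pv_pyGet_last (l : List Char) (a : Char) :
    PySem.Chars.pyGet? (l ++ [a]) (-1) = some a := by
  simp [PySem.Chars.pyGet?, PySem.List.pyGet?, PySem.List.pyIdx?]

lemma pv_pyGet_penult (l : List Char) (a b : Char) :
    PySem.Chars.pyGet? (l ++ [a, b]) (-2) = some a := by
  simp [PySem.Chars.pyGet?, PySem.List.pyGet?, PySem.List.pyIdx?]

lemma pv_pyGet_head (l : List Char) (c : Char) :
    PySem.Chars.pyGet? (c :: l) 0 = some c := by
  simp [PySem.Chars.pyGet?, PySem.List.pyGet?, PySem.List.pyIdx?]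

lemma pv_slice_dropLast (l : List Char) :
    PySem.Chars.slice l none (some (-1)) = l.dropLast := by
  simp [PySem.Chars.slice, pysem]

-- under Pre_, A's loop body is exactly "modify at B's (suit, num) key"
lemma pv_bodyA_eq (d : PySem.Dict Char (List (List Char))) (s : List Char)
    (h0 : s ≠ []) (hr : s ≠ ['r']) :
    (if PySem.Chars.endswith (mjai_tile_to_agari s) ['z'] then
       match PySem.Chars.pyGet? (mjai_tile_to_agari s) 0 with
       | some c => d.modify 'z' [] (fun l => l ++ [[c]])
       | none => d
     else
       match PySem.Chars.pyGet? (mjai_tile_to_agari s) (-1) with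
       | some suit => d.modify suit [] (fun l => l ++ [PySem.Chars.slice (mjai_tile_to_agari s) none (some (-1))])
       | none => d)
    = d.modify (pvTileKey ((PySem.Dict.ofList pvHonorPairs).getD s s)).1 []
        (fun l => l ++ [(pvTileKey ((PySem.Dict.ofList pvHonorPairs).getD s s)).2]) := by
  rcases hg : (PySem.Dict.ofList pvHonorPairs).get? s with _ | v
  · -- not an honor tile
    rw [PySem.Dict.getD_of_get?_eq_none _ _ hg]
    simp only [mjai_tile_to_agari, hg]
    obtain ⟨l', c, rfl⟩ : ∃ l' c, s = l' ++ [c] := by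
      rcases List.eq_nil_or_concat s with h | ⟨l', c, h⟩
      · exact absurd h h0
      · exact ⟨l', c, by simpa using h⟩
    by_cases hcr : c = 'r'
    · subst hcr
      have hl' : l' ≠ [] := by rintro rfl; exact hr rfl
      obtain ⟨l2, c2, rfl⟩ : ∃ l2 c2, l' = l2 ++ [c2] := by
        rcases List.eq_nil_or_concat l' with h | ⟨l2, c2, h⟩
        · exact absurd h hl'
        · exact ⟨l2, c2, by simpa using h⟩
      unfold pvTileKey
      rw [pv_endswith_concat, pv_endswith_concat]
      have hp : PySem.Chars.pyGet? (l2 ++ [c2] ++ ['r']) (-2) = some c2 := by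
        rw [List.append_assoc]; exact pv_pyGet_penult l2 c2 'r'
      simp only [hp]
      have hez : PySem.Chars.endswith ['0', c2] ['z'] = (c2 == 'z') := pv_endswith_concat ['0'] c2 'z'
      have hlast : PySem.List.pyGet? ['0', c2] (-1) = some c2 := pv_pyGet_last ['0'] c2
      have hsl : PySem.List.slice ['0', c2] none (some (-1)) = ['0'] := by
        have := pv_slice_dropLast ['0', c2]
        simpa [PySem.Chars.slice] using this
      by_cases hc2 : c2 = 'z'
      · subst hc2
        simp [hez]
      · simp [hez, hlast, hsl, hc2]
    · -- not a red five: the tile passes through unchanged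
      unfold pvTileKey
      simp only [pv_endswith_concat]
      have hcr' : (c == 'r') = false := by simp [hcr]
      simp only [hcr', Bool.false_eq_true, if_false]
      simp only [pv_endswith_concat]
      have hlast : PySem.Chars.pyGet? (l' ++ [c]) (-1) = some c := pv_pyGet_last l' c
      by_cases hcz : c = 'z'
      · subst hcz
        simp only [beq_self_eq_true, if_true]
        obtain ⟨a, ha⟩ : ∃ a, PySem.Chars.pyGet? (l' ++ ['z']) 0 = some a := by
          cases l' with
          | nil => exact ⟨'z', rfl⟩
          | cons x xs => exact ⟨x, pv_pyGet_head _ x⟩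
        rw [ha]
      · have hcz' : (c == 'z') = false := by simp [hcz]
        simp only [hcz', Bool.false_eq_true, if_false]
        rw [hlast]
  · -- honor tile: seven concrete cases
    rw [PySem.Dict.getD_of_get?_eq_some _ _ hg]
    have hitems := PySem.Dict.mem_items_of_get?_eq_some _ hg
    have hi : (PySem.Dict.ofList pvHonorPairs).items = pvHonorPairs := by decide
    rw [hi] at hitems
    simp only [mjai_tile_to_agari, hg]
    fin_cases hitems <;> rfl


-- string-building helpers for the final assembly
lemma pv_join_nil (xs : List (List Char)) : PySem.Chars.join [] xs = xs.flatten := by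
  induction xs with
  | nil => rfl
  | cons x t ih =>
    cases t with
    | nil => simp [PySem.Chars.join, List.intercalate]
    | cons y u =>
      simp only [PySem.Chars.join, List.intercalate] at ih ⊢
      simp_all [List.intersperse]

lemma pv_flatten_flatMap {α : Type} (l : List α) (f : α → List (List Char)) :
    (l.flatMap f).flatten = l.flatMap (fun x => (f x).flatten) := by
  induction l with
  | nil => rfl
  | cons x t ih => simp [List.flatMap_cons, ih]

lemma pv_flatten_filter_map {α : Type} (l : List α) (q : α → Bool) (f : α → List Char) :
    ((l.filter q).map f).flatten = l.flatMap (fun c => if q c then f c else []) := by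
  induction l with
  | nil => rfl
  | cons x t ih =>
    rw [List.filter_cons]
    by_cases h : q x <;> simp [h, ih]

lemma pv_chunk_nil_iff (P : List (Char × List Char)) (c : Char) :
    pvChunk P c = [] ↔ pvASuit P c = [] := by
  unfold pvChunk
  rw [pv_sorted2_key, List.map_eq_nil_iff]
  constructor
  · intro h
    have := PySem.List.sorted_perm (pvASuit P c) pvKey false
    rw [h] at this
    exact this.symm.eq_nil
  · intro h; rw [h]; rfl

-- the per-suit piece of the final comparison
lemma pv_piece (P : List (Char × List Char)) (c : Char) (hl : pvLetterOf (pvRank c) = [c]) :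
    (if pvChunk P c = [] then ([] : List (List Char))
     else (pvChunk P c).map (fun x => x.2.2) ++ [pvLetterOf (pvRank c)]).flatten
    = (if decide (pvASuit P c ≠ []) = true then
        PySem.Chars.join [] (PySem.List.sorted2 (pvASuit P c) (fun x => x == ['0']) (fun x => x)) ++ [c]
      else []) := by
  by_cases h : pvASuit P c = []
  · rw [if_pos ((pv_chunk_nil_iff P c).mpr h), if_neg (by simp [h])]
    rfl
  · rw [if_neg (fun hh => h ((pv_chunk_nil_iff P c).mp hh)), if_pos (by simp [h])]
    have hm : (pvChunk P c).map (fun x => x.2.2)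
        = PySem.List.sorted2 (pvASuit P c) (fun x => x == ['0']) (fun x => x) := by
      unfold pvChunk
      rw [List.map_map]
      simp [Function.comp_def]
    rw [pv_join_nil]
    simp [hm, hl]

-- ===== VERDICT (by name: the statement is the Claim_ definition above) =====
theorem mjai_tiles_to_agari_spec : Claim_equal_mjai_tiles_to_agari := by
  intro tiles _ hpre
  unfold Spec_mjai_tiles_to_agari
  simp only [mjai_tiles_to_agari, mjai_tiles_to_agari_alt]
  -- A's dict loop: each step is a modify at the resolved (suit, num) key
  rw [show (List.foldl
        (fun (d : PySem.Dict Char (List (List Char))) tile =>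
          if PySem.Chars.endswith (mjai_tile_to_agari tile.toList) ['z'] = true then
            match PySem.Chars.pyGet? (mjai_tile_to_agari tile.toList) 0 with
            | some c => d.modify 'z' [] fun l => l ++ [[c]]
            | none => d
          else
            match PySem.Chars.pyGet? (mjai_tile_to_agari tile.toList) (-1) with
            | some suit =>
              d.modify suit [] fun l =>
                l ++ [PySem.Chars.slice (mjai_tile_to_agari tile.toList) none (some (-1))]
            | none => d)
        PySem.Dict.empty tiles)
      = List.foldl (fun d p => d.modify p.1 [] fun l => l ++ [p.2]) PySem.Dict.empty
          (tiles.map pvResolve) from by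
    rw [List.foldl_map]
    exact PySem.List.foldl_congr_mem tiles _ _ _
      (fun d t ht => pv_bodyA_eq d t.toList (hpre t ht).1 (hpre t ht).2)]
  -- B's keyed list is the decorated, suit-filtered resolved pairs
  rw [pv_keyed_eq tiles]
  rw [show PySem.List.sorted (((tiles.map pvResolve).filter (fun p => decide (0 ≤ pvRank p.1))).map pvG)
        (fun x => toLex (x.1, toLex (x.2.1, x.2.2)))
      = pvSuitLetter.flatMap (fun c => pvChunk (tiles.map pvResolve) c) from
    pv_sorted_eq_chunks (tiles.map pvResolve)]
  congr 1
  rw [pv_join_nil, pv_join_nil]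
  -- A's result loop: rewrite every bucket lookup to the filter form, then to filter/map
  rw [show (List.foldl
        (fun (res : List (List Char)) suit =>
          if (List.foldl (fun d p => d.modify p.1 [] fun l => l ++ [p.2]) PySem.Dict.empty
                (tiles.map pvResolve)).getD suit [] ≠ [] then
            res ++ [PySem.Chars.join []
                (PySem.List.sorted2 ((List.foldl (fun d p => d.modify p.1 [] fun l => l ++ [p.2])
                    PySem.Dict.empty (tiles.map pvResolve)).getD suit [])
                  (fun x => x == ['0']) (fun x => x)) ++ [suit]]
          else res)
        [] ['m','p','s','z'])
      = (['m','p','s','z'].filter (fun c => decide (pvASuit (tiles.map pvResolve) c ≠ []))).map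
          (fun c => PySem.Chars.join []
            (PySem.List.sorted2 (pvASuit (tiles.map pvResolve) c) (fun x => x == ['0']) (fun x => x)) ++ [c]) from by
    rw [PySem.List.foldl_congr_mem ['m','p','s','z'] _
      (fun res c => if pvASuit (tiles.map pvResolve) c ≠ [] then
          res ++ [PySem.Chars.join []
            (PySem.List.sorted2 (pvASuit (tiles.map pvResolve) c) (fun x => x == ['0']) (fun x => x)) ++ [c]]
        else res) _
      (fun res c _ => by
        rw [PySem.Dict.getD_foldl_modify_append (tiles.map pvResolve) PySem.Dict.empty c]
        simp only [PySem.Dict.getD_empty, List.nil_append]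
        rfl)]
    simpa using PySem.List.foldl_append_ite (fun c => pvASuit (tiles.map pvResolve) c ≠ [])
      (fun c => PySem.Chars.join []
        (PySem.List.sorted2 (pvASuit (tiles.map pvResolve) c) (fun x => x == ['0']) (fun x => x)) ++ [c])
      ['m','p','s','z'] []]
  -- B's emission scan over the grouped chunks
  rw [show (List.foldl
        (fun (st : List (List Char) × Int) x =>
          (( if st.2 ≥ 0 ∧ x.1 ≠ st.2 then
              st.1 ++ [match PySem.Chars.pyGet? pvSuitLetter st.2 with | some c => [c] | none => []]
            else st.1) ++ [x.2.2], x.1))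
        ([], -1) (pvSuitLetter.flatMap (fun c => pvChunk (tiles.map pvResolve) c)))
      = (pvSuitLetter.flatMap (fun c => pvChunk (tiles.map pvResolve) c)).foldl pvStep ([], -1) from rfl]
  have hemit := pv_emit_gen (tiles.map pvResolve) pvSuitLetter [] (-1)
    (by intro c hc; fin_cases hc <;> decide)
    (by
      refine List.pairwise_cons.mpr ⟨?_, List.pairwise_cons.mpr ⟨?_, List.pairwise_cons.mpr ⟨?_, List.pairwise_singleton _ _⟩⟩⟩ <;>
        (intro b hb; fin_cases hb <;> decide))
    (by intro c hc; fin_cases hc <;> decide)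
  rw [show (if (((pvSuitLetter.flatMap (fun c => pvChunk (tiles.map pvResolve) c)).foldl pvStep ([], -1)).2) ≥ 0 then
        (((pvSuitLetter.flatMap (fun c => pvChunk (tiles.map pvResolve) c)).foldl pvStep ([], -1)).1)
          ++ [match PySem.Chars.pyGet? pvSuitLetter
                (((pvSuitLetter.flatMap (fun c => pvChunk (tiles.map pvResolve) c)).foldl pvStep ([], -1)).2)
              with | some c => [c] | none => []]
      else (((pvSuitLetter.flatMap (fun c => pvChunk (tiles.map pvResolve) c)).foldl pvStep ([], -1)).1))
      = pvClose ((pvSuitLetter.flatMap (fun c => pvChunk (tiles.map pvResolve) c)).foldl pvStep ([], -1)) from rfl]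
  rw [hemit]
  rw [show pvClose (([] : List (List Char)), (-1 : Int)) = [] from rfl, List.nil_append]
  rw [pv_flatten_filter_map, pv_flatten_flatMap]
  simp only [pvSuitLetter, List.flatMap_cons, List.flatMap_nil, List.append_nil]
  rw [pv_piece _ 'm' (by decide), pv_piece _ 'p' (by decide),
    pv_piece _ 's' (by decide), pv_piece _ 'z' (by decide)]
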